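-- pv_equiv track=rewrite | github.com/michal-jewczuk/advent-of-code | 2020/d06_p1.py | transform_input_data
-- ===== SOURCE A (Python) =====
-- def transform_input_data(input_data):
--     data = []
--     answers_line = ''
--
--     for line in input_data:
--         if line.isspace():
--            data.append(set(answers_line.strip()))
--            answers_line = ''
--         else:
--            answers_line += line.strip()
--
--     data.append(set(answers_line.strip()))
--
--     return data
-- ===== SOURCE B (Python) =====
-- def transform_input_data(input_data):
--     n = len(input_data)
--     cuts = [i for i in range(n) if input_data[i].isspace()]
--     starts = [0] + [c + 1 for c in cuts]
--     ends = cuts + [n]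
--     return [set(''.join(line.strip() for line in input_data[a:b]))
--             for a, b in zip(starts, ends)]
-- ===== Notes on version B (the rewrite author's own statement) =====
-- stated objective: alternative
-- what changed: B never scans with a running accumulator: it first computes the list of separator indices with a range filter, derives the (start,end) boundary pairs, and then builds each answer set from a slice input_data[a:b] of the original list.
import Mathlib
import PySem

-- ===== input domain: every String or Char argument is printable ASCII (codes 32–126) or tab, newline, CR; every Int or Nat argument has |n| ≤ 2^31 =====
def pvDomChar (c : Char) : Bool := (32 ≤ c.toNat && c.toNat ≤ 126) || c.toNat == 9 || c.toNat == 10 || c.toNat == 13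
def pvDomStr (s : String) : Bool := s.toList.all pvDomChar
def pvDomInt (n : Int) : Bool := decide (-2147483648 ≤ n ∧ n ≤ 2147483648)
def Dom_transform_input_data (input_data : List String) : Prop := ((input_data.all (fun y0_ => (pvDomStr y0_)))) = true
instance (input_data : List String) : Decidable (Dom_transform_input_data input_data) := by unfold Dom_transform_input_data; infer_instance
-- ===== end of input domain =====

-- B replaces A's single accumulator scan by index arithmetic: it filters out the
-- separator positions, pairs them into (start, end) boundaries, and builds each
-- answer set from a slice of the original list. Same cost ("alternative").

-- set(s) for a Python string s given as chars: the distinct one-char strings, first occurrence order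
def setOfChars (cs : List Char) : List String :=
  PySem.Set.ofList (cs.map (fun c => String.ofList [c]))

-- ===== PORT A =====
def stepA (st : List (List String) × List Char) (line : String) :
    List (List String) × List Char :=
  if PySem.Str.strIsspace line then
    (st.1 ++ [setOfChars (PySem.Chars.strip st.2)], [])
  else
    (st.1, st.2 ++ PySem.Chars.strip line.toList)

def transform_input_data (input_data : List String) : List (List String) :=
  let r := input_data.foldl stepA ([], [])
  r.1 ++ [setOfChars (PySem.Chars.strip r.2)]

-- ===== PORT B =====
def transform_input_data_alt (input_data : List String) : List (List String) :=
  let n : Int := input_data.length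
  let cuts : List Int := (PySem.List.pyRange 0 n 1).filter
    (fun i => PySem.Str.strIsspace (PySem.List.pyGetD input_data i ""))
  let starts : List Int := 0 :: cuts.map (· + 1)
  let ends : List Int := cuts ++ [n]
  (starts.zip ends).map (fun ab =>
    setOfChars (PySem.Chars.join []
      ((PySem.List.slice input_data (some ab.1) (some ab.2)).map
        (fun line => PySem.Chars.strip line.toList))))

-- ===== PRECONDITION & SPEC =====
def Spec_transform_input_data (input_data : List String) (out : List (List String)) : Prop := out = transform_input_data_alt input_data
instance (input_data : List String) (out : List (List String)) : Decidable (Spec_transform_input_data input_data out) := by unfold Spec_transform_input_data; infer_instance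

-- ===== CLAIM (what is proved, stated in full; the proofs are below) =====
def Claim_equal_transform_input_data : Prop := ∀ (input_data : List String), Dom_transform_input_data input_data → Spec_transform_input_data input_data (transform_input_data input_data)

-- ===== LEMMAS AND PROOFS =====

-- the common specification: the list of groups, each group = stripped non-separator lines
def Gspec : List String → List (List (List Char))
  | [] => [[]]
  | l :: ls =>
    if PySem.Chars.strIsspace l.toList then [] :: Gspec ls
    else match Gspec ls with
      | [] => [[PySem.Chars.strip l.toList]]
      | g :: gs => (PySem.Chars.strip l.toList :: g) :: gs

lemma Gspec_ne_nil (ls : List String) : Gspec ls ≠ [] := by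
  cases ls with
  | nil => simp [Gspec]
  | cons l ls =>
    simp only [Gspec]
    split_ifs
    · simp
    · rcases h : Gspec ls with _ | ⟨g, gs⟩ <;> simp

-- ---- A-side lemmas (the final .strip() is a no-op on concatenations of stripped pieces) ----

lemma dropWhile_flatten_fix (f : Char → Bool) :
    ∀ (l : List (List Char)), (∀ p ∈ l, List.dropWhile f p = p) →
    List.dropWhile f l.flatten = l.flatten := by
  intro l
  induction l with
  | nil => intro _; simp
  | cons p rest ih =>
    intro h
    have hp := h p (by simp)
    cases p with
    | nil => simpa using ih (fun q hq => h q (by simp [hq]))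
    | cons c cs =>
      have hc : f c = false := by
        by_contra hc
        simp [eq_true_of_ne_false hc] at hp
        have h1 := congrArg List.length hp
        have h2 := List.length_dropWhile_le f cs
        simp at h1
        omega
      simp [hc]

lemma lstrip_fix_of_strip_fix {p : List Char} (h : PySem.Chars.strip p = p) :
    List.dropWhile PySem.Chars.isspace p = p := by
  have h1 : (PySem.Chars.lstrip p).length ≤ p.length := List.length_dropWhile_le _ _
  have h2 : (PySem.Chars.rstrip (PySem.Chars.lstrip p)).length ≤ (PySem.Chars.lstrip p).length := by
    simpa [PySem.Chars.rstrip] using List.length_dropWhile_le PySem.Chars.isspace (PySem.Chars.lstrip p).reverse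
  have hl : (PySem.Chars.lstrip p).length = p.length := by
    have : (PySem.Chars.strip p).length = p.length := by rw [h]
    simp [PySem.Chars.strip] at this; omega
  have hsuf : PySem.Chars.lstrip p <:+ p := List.dropWhile_suffix _
  have := List.IsSuffix.eq_of_length hsuf hl
  simpa [PySem.Chars.lstrip] using this

lemma rstrip_fix_of_strip_fix {p : List Char} (h : PySem.Chars.strip p = p) :
    List.dropWhile PySem.Chars.isspace p.reverse = p.reverse := by
  have hl := lstrip_fix_of_strip_fix h
  have : PySem.Chars.rstrip p = p := by
    have : PySem.Chars.strip p = PySem.Chars.rstrip p := by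
      simp [PySem.Chars.strip, PySem.Chars.lstrip, hl]
    rw [← this, h]
  have := congrArg List.reverse this
  simpa [PySem.Chars.rstrip] using this

lemma strip_flatten (l : List (List Char)) (h : ∀ p ∈ l, PySem.Chars.strip p = p) :
    PySem.Chars.strip l.flatten = l.flatten := by
  have h1 : PySem.Chars.lstrip l.flatten = l.flatten :=
    dropWhile_flatten_fix _ l (fun p hp => lstrip_fix_of_strip_fix (h p hp))
  have h2 : List.dropWhile PySem.Chars.isspace l.flatten.reverse = l.flatten.reverse := by
    have := dropWhile_flatten_fix PySem.Chars.isspace ((l.map List.reverse).reverse)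
      (by
        intro q hq
        simp only [List.mem_reverse, List.mem_map] at hq
        obtain ⟨p, hp, rfl⟩ := hq
        exact rstrip_fix_of_strip_fix (h p hp))
    simpa [List.reverse_flatten] using this
  simp [PySem.Chars.strip, h1, PySem.Chars.rstrip, h2]

lemma dw_head (f : Char → Bool) (l : List Char) (c : Char) (cs : List Char)
    (h : List.dropWhile f l = c :: cs) : f c = false := by
  have := List.head_dropWhile_not f (l := l) (by simp [h])
  simpa [h] using this

lemma dw_fix_prefix (f : Char → Bool) (q y : List Char) (hp : q <+: y)
    (hy : List.dropWhile f y = y) : List.dropWhile f q = q := by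
  cases q with
  | nil => simp
  | cons c cs =>
    obtain ⟨t, rfl⟩ := hp
    have hc : f c = false := dw_head f (c :: (cs ++ t)) c (cs ++ t) (by simpa using hy)
    simp [hc]

lemma rstrip_prefix (z : List Char) : PySem.Chars.rstrip z <+: z := by
  apply List.reverse_suffix.mp
  simpa [PySem.Chars.rstrip] using List.dropWhile_suffix (l := z.reverse) (p := PySem.Chars.isspace)

lemma rstrip_idem (z : List Char) :
    PySem.Chars.rstrip (PySem.Chars.rstrip z) = PySem.Chars.rstrip z := by
  simp [PySem.Chars.rstrip, List.dropWhile_idempotent]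

lemma strip_idem (x : List Char) :
    PySem.Chars.strip (PySem.Chars.strip x) = PySem.Chars.strip x := by
  have h1 : PySem.Chars.lstrip (PySem.Chars.strip x) = PySem.Chars.strip x := by
    apply dw_fix_prefix PySem.Chars.isspace _ (PySem.Chars.lstrip x)
    · exact rstrip_prefix _
    · simp [PySem.Chars.lstrip, List.dropWhile_idempotent]
  show PySem.Chars.rstrip (PySem.Chars.lstrip (PySem.Chars.strip x)) = PySem.Chars.strip x
  rw [h1]
  exact rstrip_idem _

lemma join_nil_sep (parts : List (List Char)) :
    PySem.Chars.join [] parts = parts.flatten := by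
  induction parts with
  | nil => simp [PySem.Chars.join, List.intercalate]
  | cons p rest ih =>
    cases rest with
    | nil => simp [PySem.Chars.join, List.intercalate]
    | cons q qs =>
      have := ih
      simp [PySem.Chars.join, List.intercalate, List.intersperse] at this ⊢
      simpa using this

-- merge an already-accumulated group into the head of a group list
def mh (cur : List (List Char)) : List (List (List Char)) → List (List (List Char))
  | [] => [cur]
  | g :: gs => (cur ++ g) :: gs

lemma mh_nil_left (G : List (List (List Char))) (h : G ≠ []) : mh [] G = G := by
  cases G with
  | nil => exact absurd rfl h
  | cons g gs => simp [mh]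

-- A's fold computes the merged group list
lemma A_loop : ∀ (ls : List String) (done : List (List String)) (cur : List (List Char)),
    (∀ p ∈ cur, PySem.Chars.strip p = p) →
    (ls.foldl stepA (done, cur.flatten)).1
      ++ [setOfChars (PySem.Chars.strip (ls.foldl stepA (done, cur.flatten)).2)]
    = done ++ (mh cur (Gspec ls)).map (fun g => setOfChars g.flatten) := by
  intro ls
  induction ls with
  | nil =>
    intro done cur hcur
    simp [Gspec, mh, strip_flatten cur hcur]
  | cons l ls ih =>
    intro done cur hcur
    by_cases hsp : PySem.Chars.strIsspace l.toList = true
    · have hA : stepA (done, cur.flatten) l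
          = (done ++ [setOfChars cur.flatten], ([] : List (List Char)).flatten) := by
        simp [stepA, PySem.Str.strIsspace_eq, hsp, strip_flatten cur hcur]
      rw [List.foldl_cons, hA, ih _ [] (by simp), mh_nil_left _ (Gspec_ne_nil ls)]
      simp [Gspec, hsp, mh]
    · have hA : stepA (done, cur.flatten) l
          = (done, (cur ++ [PySem.Chars.strip l.toList]).flatten) := by
        simp [stepA, PySem.Str.strIsspace_eq, hsp]
      have hcur' : ∀ p ∈ cur ++ [PySem.Chars.strip l.toList], PySem.Chars.strip p = p := by
        intro p hp
        rcases List.mem_append.mp hp with h | h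
        · exact hcur p h
        · simp at h; subst h; exact strip_idem _
      rw [List.foldl_cons, hA, ih _ _ hcur']
      rcases hG : Gspec ls with _ | ⟨g, gs⟩
      · exact absurd hG (Gspec_ne_nil ls)
      · simp [Gspec, hsp, hG, mh]

-- ---- B-side: Nat-level characterisation of the cut indices and boundary pairs ----

def cutsN (ls : List String) : List Nat :=
  (List.range ls.length).filter (fun k => PySem.Chars.strIsspace (ls.getD k "").toList)

def pairsN (ls : List String) : List (Nat × Nat) :=
  ((0 :: (cutsN ls).map (· + 1)).zip (cutsN ls ++ [ls.length]))

def groupN (ls : List String) (ab : Nat × Nat) : List (List Char) :=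
  ((ls.drop ab.1).take (ab.2 - ab.1)).map (fun line => PySem.Chars.strip line.toList)

lemma cutsN_cons (l : String) (ls : List String) :
    cutsN (l :: ls) = (if PySem.Chars.strIsspace l.toList then [0] else [])
      ++ (cutsN ls).map (· + 1) := by
  simp only [cutsN, List.length_cons, List.range_succ_eq_map, List.filter_cons]
  have : List.filter (fun k => PySem.Chars.strIsspace ((l :: ls).getD k "").toList)
      (List.map Nat.succ (List.range ls.length))
      = List.map (· + 1) (List.filter (fun k => PySem.Chars.strIsspace (ls.getD k "").toList)
          (List.range ls.length)) := by
    rw [List.filter_map]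
    simp [Function.comp_def]
  rw [this]
  simp only [List.getD_cons_zero]
  split_ifs with h
  · simp
  · simp

lemma groupN_shift (l : String) (ls : List String) (ab : Nat × Nat) :
    groupN (l :: ls) (ab.1 + 1, ab.2 + 1) = groupN ls ab := by
  simp [groupN, Nat.succ_sub_succ]

lemma map_groupN_shift (l : String) (ls : List String) (ps : List (Nat × Nat)) :
    (ps.map (Prod.map (· + 1) (· + 1))).map (groupN (l :: ls)) = ps.map (groupN ls) := by
  rw [List.map_map]
  apply List.map_congr_left
  intro ab _
  simpa [Prod.map] using groupN_shift l ls ab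

lemma groupsN_eq_Gspec : ∀ (ls : List String),
    (pairsN ls).map (groupN ls) = Gspec ls := by
  intro ls
  induction ls with
  | nil => simp [pairsN, cutsN, groupN, Gspec]
  | cons l ls ih =>
    by_cases hsp : PySem.Chars.strIsspace l.toList = true
    · -- separator: a fresh empty group, the rest shifted by one
      have hp : pairsN (l :: ls) = (0, 0) :: (pairsN ls).map (Prod.map (· + 1) (· + 1)) := by
        simp only [pairsN, cutsN_cons, hsp, if_pos, List.length_cons]
        rw [← List.zip_map]
        simp [List.map_map, Function.comp_def]
      rw [hp]
      simp only [List.map_cons, map_groupN_shift, ih]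
      simp [Gspec, hsp, groupN]
    · -- non-separator: the head group gains strip l, the rest shifted by one
      rcases hc : cutsN ls with _ | ⟨c0, ct⟩
      · -- no separators below: a single group spanning everything
        have hGl : Gspec ls = [groupN ls (0, ls.length)] := by
          rw [← ih]; simp [pairsN, hc]
        have hp : pairsN (l :: ls) = [(0, ls.length + 1)] := by
          simp [pairsN, cutsN_cons, hsp, hc]
        have hhead : groupN (l :: ls) (0, ls.length + 1)
            = PySem.Chars.strip l.toList :: groupN ls (0, ls.length) := by
          simp [groupN]
        rw [hp]
        simp only [List.map_cons, List.map_nil, hhead]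
        simp [Gspec, hsp, hGl]
      · -- first separator at c0: head group gains strip l, the rest shifts
        have hGl : Gspec ls = groupN ls (0, c0)
            :: (((c0 + 1) :: ct.map (· + 1)).zip (ct ++ [ls.length])).map (groupN ls) := by
          rw [← ih]; simp [pairsN, hc]
        have hp : pairsN (l :: ls) = (0, c0 + 1)
            :: ((((c0 + 1) :: ct.map (· + 1)).zip (ct ++ [ls.length])).map
                (Prod.map (· + 1) (· + 1))) := by
          simp only [pairsN, cutsN_cons, hsp, if_neg, hc, List.length_cons,
            Bool.not_eq_true, List.map_cons, List.cons_append, List.zip_cons_cons,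
            List.nil_append]
          rw [← List.zip_map]
          simp [List.map_map, Function.comp_def]
        have hhead : groupN (l :: ls) (0, c0 + 1)
            = PySem.Chars.strip l.toList :: groupN ls (0, c0) := by
          simp [groupN]
        rw [hp]
        simp only [List.map_cons, map_groupN_shift, hhead]
        simp [Gspec, hsp, hGl]

-- B's port computes the same group list (Int bookkeeping removed)
lemma alt_eq_groupsN (ls : List String) :
    transform_input_data_alt ls
      = (pairsN ls).map (fun ab => setOfChars (groupN ls ab).flatten) := by
  simp only [transform_input_data_alt]
  have hcuts : (PySem.List.pyRange 0 (ls.length : Int) 1).filter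
      (fun i => PySem.Str.strIsspace (PySem.List.pyGetD ls i ""))
      = (cutsN ls).map (Nat.cast : Nat → Int) := by
    rw [PySem.List.pyRange_zero_nat, List.filter_map]
    simp [cutsN, Function.comp_def, PySem.Str.strIsspace_eq, List.getD]
  rw [hcuts]
  have hstarts : (0 : Int) :: ((cutsN ls).map (Nat.cast : Nat → Int)).map (· + 1)
      = ((0 : Nat) :: (cutsN ls).map (· + 1)).map (Nat.cast : Nat → Int) := by
    simp [List.map_map, Function.comp_def]
  have hends : ((cutsN ls).map (Nat.cast : Nat → Int)) ++ [(ls.length : Int)]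
      = (cutsN ls ++ [ls.length]).map (Nat.cast : Nat → Int) := by
    simp
  rw [hstarts, hends, List.zip_map, List.map_map]
  apply List.map_congr_left
  intro ab _
  simp only [Function.comp_def, Prod.map, PySem.List.slice_natCast, join_nil_sep]
  simp [groupN]

-- ===== VERDICT (by name: the statement is the Claim_ definition above) =====
theorem transform_input_data_spec : Claim_equal_transform_input_data := by
  intro input_data _
  unfold Spec_transform_input_data
  have hA : transform_input_data input_data
      = (Gspec input_data).map (fun g => setOfChars g.flatten) := by
    have := A_loop input_data [] [] (by simp)
    simpa [transform_input_data, mh_nil_left _ (Gspec_ne_nil input_data)] using this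
  have hB : transform_input_data_alt input_data
      = (Gspec input_data).map (fun g => setOfChars g.flatten) := by
    rw [alt_eq_groupsN, ← groupsN_eq_Gspec, List.map_map]
    rfl
  rw [hA, hB]
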